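-- pv_equiv track=rewrite | github.com/Hiraoka-Group/rsu-project | rsuanalyzer/enum_ids/exclude_dups.py | _lig_con_set_revs
-- ===== SOURCE A (Python) =====
-- from itertools import product
--
-- def _lig_con_set_revs(conf_id: str) -> set[str]:
--     ids = set()
--     cur_id_2 = conf_id[1:] + conf_id[0]  # "RRFF" -> "RFFR"
--
--     # "RFFR" -> ["RF", "FR"]
--     lig_con_sets = [
--         cur_id_2[i:i+2] for i in range(0, len(cur_id_2), 2)]
--
--     # Enumerate all the possible combinations of if the ligand type and
--     # the connection type are reversed.
--     for rev_list in product([True, False], repeat=len(lig_con_sets)):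
--         new_lig_con_set_list = []
--         for lig_con_set, rev in zip(lig_con_sets, rev_list):
--             if rev:
--                 new_lig_con_set_list.append(
--                     lig_con_set.translate(
--                         str.maketrans("RLFB", "LRBF")))
--             else:
--                 new_lig_con_set_list.append(lig_con_set)
--         new_id_2 = "".join(new_lig_con_set_list)
--         ids.add(new_id_2[-1] + new_id_2[:-1])
--
--     return ids
-- ===== SOURCE B (Python) =====
-- def _lig_con_set_revs(conf_id: str) -> set[str]:
--     # No rotation, no chunking, no itertools.product: enumerate reversal choices as
--     # integer bitmasks and build each variant in one pass over the original string,
--     # computing each character's pair index by modular index arithmetic.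
--     n = len(conf_id)
--     tr = {'R': 'L', 'L': 'R', 'F': 'B', 'B': 'F'}
--     k = (n + 1) // 2
--     ids = set()
--     for mask in range(1 << k):
--         ids.add(''.join(
--             c if (mask >> (k - 1 - ((i + n - 1) % n) // 2)) & 1
--             else tr.get(c, c)
--             for i, c in enumerate(conf_id)))
--     return ids
-- ===== Notes on version B (the rewrite author's own statement) =====
-- stated objective: alternative
-- what changed: Replaces A's rotate/chunk/itertools.product pipeline by direct bitmask enumeration: each of the 2^ceil(n/2) variants is built in one pass over the original (unrotated) string, each character's reversal flag read off an integer mask via modular index arithmetic, so the chunk list, the boolean tuples, the per-combination list rebuild and the rotate-back step all disappear.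
import Mathlib
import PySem

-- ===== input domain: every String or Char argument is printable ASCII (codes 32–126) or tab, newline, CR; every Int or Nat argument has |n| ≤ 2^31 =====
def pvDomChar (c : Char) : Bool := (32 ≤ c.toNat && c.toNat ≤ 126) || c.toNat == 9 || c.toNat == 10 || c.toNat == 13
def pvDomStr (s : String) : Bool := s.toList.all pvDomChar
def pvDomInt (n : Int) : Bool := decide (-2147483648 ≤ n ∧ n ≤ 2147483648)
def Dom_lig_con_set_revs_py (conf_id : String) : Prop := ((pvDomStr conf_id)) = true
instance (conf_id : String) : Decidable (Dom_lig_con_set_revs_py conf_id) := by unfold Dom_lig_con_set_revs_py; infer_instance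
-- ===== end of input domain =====

-- B drops A's rotate / chunk / itertools.product pipeline: it enumerates reversal choices as
-- integer bitmasks and builds each variant in one pass over the original (unrotated) string,
-- locating each character's pair by modular index arithmetic (objective: alternative, same cost).

-- translate(str.maketrans("RLFB", "LRBF")) on one character (exact: identity off RLFB)
def pvTrans (c : Char) : Char :=
  if c = 'R' then 'L' else if c = 'L' then 'R'
  else if c = 'F' then 'B' else if c = 'B' then 'F' else c

-- ===== PORT A =====
-- itertools.product([True, False], repeat=n), tuples as lists, last component fastest
def pvProduct : Nat → List (List Bool)
  | 0 => [[]]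
  | n + 1 => [true, false].flatMap (fun b => (pvProduct n).map (fun rl => b :: rl))

def lig_con_set_revs_py (conf_id : String) : List String :=
  match PySem.List.pyGet? conf_id.toList 0 with
  | none => []   -- conf_id[0] raises IndexError on ""; excluded by Pre_
  | some c0 =>
    let cur : List Char := PySem.List.slice conf_id.toList (some 1) none ++ [c0]
    let ligConSets : List (List Char) :=
      (PySem.List.pyRange 0 cur.length 2).map
        (fun i => PySem.List.slice cur (some i) (some (i + 2)))
    let ids : PySem.Set String :=
      (pvProduct ligConSets.length).foldl
        (fun ids revList =>
          let newList : List (List Char) :=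
            (ligConSets.zip revList).foldl
              (fun acc q => acc ++ [if q.2 then q.1.map pvTrans else q.1]) []
          let newId2 : List Char := newList.flatten
          PySem.Set.add ids
            (String.ofList (PySem.List.pyGetD newId2 (-1) ' ' ::
              PySem.List.slice newId2 none (some (-1)))))
        PySem.Set.empty
    ids

-- ===== PORT B =====
-- Source B works over nonnegative ints only: range(1 << k), the shift counts, '& 1' and the pair
-- index (i + n - 1) % n // 2 are all ≥ 0, so they are ported over Nat ('& 1' = '% 2'), exact there.
def lig_con_set_revs_py_alt (conf_id : String) : List String :=
  let cs := conf_id.toList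
  let n := cs.length
  let tr : PySem.Dict Char Char := PySem.Dict.ofList [('R', 'L'), ('L', 'R'), ('F', 'B'), ('B', 'F')]
  let k := (n + 1) / 2
  (List.range (2 ^ k)).foldl
    (fun ids mask =>
      PySem.Set.add ids (String.ofList
        ((PySem.List.enumerate cs).map (fun ic =>
          if (mask >>> (k - 1 - ((ic.1 + (n : Int) - 1).toNat % n) / 2)) % 2 = 1 then ic.2
          else PySem.Dict.getD tr ic.2 ic.2))))
    PySem.Set.empty

-- ===== PRECONDITION & SPEC =====
-- Pre_ excludes only the empty string, on which A raises IndexError at conf_id[0].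
def Pre_lig_con_set_revs_py (conf_id : String) : Prop := conf_id.toList ≠ []
instance (conf_id : String) : Decidable (Pre_lig_con_set_revs_py conf_id) := by
  unfold Pre_lig_con_set_revs_py; infer_instance

def pvWitness_lig_con_set_revs_py : String := "RRFF"

def Spec_lig_con_set_revs_py (conf_id : String) (out : List String) : Prop :=
  out = lig_con_set_revs_py_alt conf_id
instance (conf_id : String) (out : List String) : Decidable (Spec_lig_con_set_revs_py conf_id out) := by
  unfold Spec_lig_con_set_revs_py; infer_instance

-- ===== CLAIM (what is proved, stated in full; the proofs are below) =====
def Claim_equal_lig_con_set_revs_py : Prop :=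
  ∀ (conf_id : String), Dom_lig_con_set_revs_py conf_id →
    Pre_lig_con_set_revs_py conf_id →
    Spec_lig_con_set_revs_py conf_id (lig_con_set_revs_py conf_id)

-- ===== LEMMAS AND PROOFS =====

-- the choice A makes for one chunk under one reversal flag
def pvChoice (q : List Char × Bool) : List Char :=
  if q.2 then q.1.map pvTrans else q.1

-- the 2-char chunks of a list (last chunk has 1 char for odd length)
def pvChunk2 : List Char → List (List Char)
  | [] => []
  | [a] => [[a]]
  | a :: b :: t => [a, b] :: pvChunk2 t

-- the m-th tuple of product([True, False], repeat=k): bits of m, MSB first, True at a 0 bit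
def pvBits (k m : Nat) : List Bool :=
  (List.range k).map (fun i => (m >>> (k - 1 - i)) % 2 == 0)

theorem pvTr_eq (c : Char) :
    PySem.Dict.getD (PySem.Dict.ofList [('R', 'L'), ('L', 'R'), ('F', 'B'), ('B', 'F')]) c c
      = pvTrans c := by
  have h : PySem.Dict.ofList [('R', 'L'), ('L', 'R'), ('F', 'B'), ('B', 'F')]
      = PySem.Dict.mk [('R', 'L'), ('L', 'R'), ('F', 'B'), ('B', 'F')] := by decide
  rw [h]
  simp only [PySem.Dict.getD, PySem.Dict.get?_mk_cons, pvTrans]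
  by_cases h1 : c = 'R' <;> by_cases h2 : c = 'L' <;> by_cases h3 : c = 'F' <;>
    by_cases h4 : c = 'B' <;>
    subst_vars <;> simp_all [beq_iff_eq, Ne.symm] <;>
    simp [PySem.Dict.get?]

theorem pvChunk2_length (l : List Char) : (pvChunk2 l).length = (l.length + 1) / 2 := by
  induction l using pvChunk2.induct <;> simp [pvChunk2, *] <;> omega

theorem pvChunks_aux (l : List Char) :
    (List.range ((l.length + 1) / 2)).map (fun t => (l.drop (2 * t)).take 2) = pvChunk2 l := by
  induction l using pvChunk2.induct with
  | case1 => simp [pvChunk2]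
  | case2 a => simp [pvChunk2]
  | case3 a b t ih =>
      have hlen : ((a :: b :: t).length + 1) / 2 = (t.length + 1) / 2 + 1 := by
        simp; omega
      rw [pvChunk2, hlen, List.range_succ_eq_map, List.map_cons]
      refine congrArg₂ _ (by simp) ?_
      rw [← ih, List.map_map]
      refine List.map_congr_left fun t' _ => ?_
      have h2 : 2 * Nat.succ t' = 2 * t' + 1 + 1 := by omega
      simp [Function.comp, h2, List.drop_succ_cons]

theorem pvChunks_eq (l : List Char) :
    (PySem.List.pyRange 0 (l.length : Int) 2).map
        (fun i => PySem.List.slice l (some i) (some (i + 2))) = pvChunk2 l := by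
  rw [PySem.List.pyRange_of_pos 0 (l.length : Int) (by norm_num)]
  rw [← pvChunks_aux l, List.map_map]
  have hN : (if (0:Int) < l.length then (((l.length : Int) - 0 + 2 - 1) / 2).toNat else 0)
      = (l.length + 1) / 2 := by
    split <;> omega
  rw [hN]
  refine List.map_congr_left fun t _ => ?_
  have h1 : (0 : Int) + 2 * (t : Int) = ((2 * t : Nat) : Int) := by push_cast; ring
  have h2 : ((2 * t : Nat) : Int) + 2 = ((2 * t : Nat) : Int) + ((2 : Nat) : Int) := by norm_num
  simp only [Function.comp, h1, h2, PySem.List.slice_natCast_add]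

theorem pvBit_drop (k s m : Nat) (hs : s < k) :
    ((2 ^ k + m) >>> s) % 2 = (m >>> s) % 2 := by
  have h : 2 ^ k = 2 ^ (k - s - 1) * 2 * 2 ^ s := by
    rw [mul_assoc, ← pow_succ', ← pow_add]; congr 1; omega
  rw [Nat.shiftRight_eq_div_pow, Nat.shiftRight_eq_div_pow, h, Nat.add_comm,
    Nat.add_mul_div_right _ _ (by positivity)]
  omega

theorem pvBits_succ_lo (k m : Nat) (hm : m < 2 ^ k) :
    pvBits (k + 1) m = true :: pvBits k m := by
  unfold pvBits
  rw [List.range_succ_eq_map, List.map_cons, List.map_map]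
  refine congrArg₂ _ ?_ (List.map_congr_left fun i _ => ?_)
  · have h0 : m >>> k = 0 := by
      simp only [Nat.shiftRight_eq_div_pow]
      exact Nat.div_eq_of_lt hm
    simp [h0]
  · simp only [Function.comp]
    have h1 : k + 1 - 1 - Nat.succ i = k - 1 - i := by omega
    rw [h1]

theorem pvBits_succ_hi (k m : Nat) (hm : m < 2 ^ k) :
    pvBits (k + 1) (2 ^ k + m) = false :: pvBits k m := by
  unfold pvBits
  rw [List.range_succ_eq_map, List.map_cons, List.map_map]
  refine congrArg₂ _ ?_ (List.map_congr_left fun i hi => ?_)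
  · have h0 : (2 ^ k + m) >>> k = 1 := by
      simp only [Nat.shiftRight_eq_div_pow]
      rw [Nat.add_comm, Nat.add_div_right _ (by positivity), Nat.div_eq_of_lt hm]
    simp [h0]
  · simp only [Function.comp]
    rw [List.mem_range] at hi
    have h1 : k + 1 - 1 - Nat.succ i = k - 1 - i := by omega
    rw [h1, pvBit_drop k (k - 1 - i) m (by omega)]

theorem pvProduct_eq_bits (k : Nat) :
    pvProduct k = (List.range (2 ^ k)).map (pvBits k) := by
  induction k with
  | zero => simp [pvProduct, pvBits]
  | succ k ih =>
      rw [pvProduct, ih]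
      have h2 : 2 ^ (k + 1) = 2 ^ k + 2 ^ k := by ring
      rw [h2, List.range_add, List.map_append]
      simp only [List.flatMap_cons, List.flatMap_nil, List.append_nil, List.map_map]
      refine congrArg₂ _ ?_ ?_ <;>
        refine List.map_congr_left fun m hm => ?_ <;> rw [List.mem_range] at hm <;>
        simp only [Function.comp]
      · exact (pvBits_succ_lo k m hm).symm
      · exact (pvBits_succ_hi k m hm).symm

theorem pvBits_getD (k m p : Nat) (hp : p < k) :
    (pvBits k m).getD p false = ((m >>> (k - 1 - p)) % 2 == 0) := by
  unfold pvBits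
  rw [List.getD_eq_getElem?_getD, List.getElem?_map, List.getElem?_range hp]
  rfl

theorem pvFlat_getElem? (l : List Char) (rl : List Bool)
    (h : rl.length = (pvChunk2 l).length) (j : Nat) :
    ((((pvChunk2 l).zip rl).map pvChoice).flatten)[j]?
      = l[j]?.map (fun c => if rl.getD (j / 2) false then pvTrans c else c) := by
  induction l using pvChunk2.induct generalizing rl j with
  | case1 => simp [pvChunk2]
  | case2 a =>
      match rl with
      | [r] =>
        match j with
        | 0 => cases r <;> simp [pvChunk2, pvChoice]
        | j + 1 => cases r <;> simp [pvChunk2, pvChoice]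
  | case3 a b t ih =>
      match rl with
      | r :: rs =>
        simp only [pvChunk2, List.length_cons] at h
        have h' : rs.length = (pvChunk2 t).length := by omega
        match j with
        | 0 => cases r <;> simp [pvChunk2, pvChoice]
        | 1 => cases r <;> simp [pvChunk2, pvChoice]
        | j + 2 =>
          have hdiv : (j + 2) / 2 = j / 2 + 1 := by omega
          cases r <;> simp [pvChunk2, pvChoice, hdiv, ih rs h']

theorem pvFlat_length (l : List Char) (rl : List Bool)
    (h : rl.length = (pvChunk2 l).length) :
    ((((pvChunk2 l).zip rl).map pvChoice).flatten).length = l.length := by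
  induction l using pvChunk2.induct generalizing rl with
  | case1 => simp [pvChunk2]
  | case2 a =>
      match rl with
      | [r] => cases r <;> simp [pvChunk2, pvChoice]
  | case3 a b t ih =>
      match rl with
      | r :: rs =>
        simp only [pvChunk2, List.length_cons] at h
        have h' : rs.length = (pvChunk2 t).length := by omega
        cases r <;> simp [pvChunk2, pvChoice, ih rs h']

theorem pvFoldAddCong {α β γ : Type} [BEq γ] (L1 : List α) (L2 : List β)
    (F : α → γ) (G : β → γ) (h : L1.map F = L2.map G) :
    L1.foldl (fun s x => PySem.Set.add s (F x)) PySem.Set.empty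
      = L2.foldl (fun s x => PySem.Set.add s (G x)) PySem.Set.empty := by
  rw [← List.foldl_map (f := F) (g := PySem.Set.add), ← List.foldl_map (f := G) (g := PySem.Set.add), h]

-- ===== VERDICT (by name: the statement is the Claim_ definition above) =====
theorem lig_con_set_revs_py_spec : Claim_equal_lig_con_set_revs_py := by
  intro conf_id _ hpre
  unfold Spec_lig_con_set_revs_py lig_con_set_revs_py lig_con_set_revs_py_alt
  cases hget : PySem.List.pyGet? conf_id.toList 0 with
  | none =>
      exfalso
      cases h : conf_id.toList with
      | nil => exact hpre h
      | cons a l => rw [h] at hget; simp at hget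
  | some c0 =>
      simp only
      set cs := conf_id.toList with hcs
      have hc0 : cs[0]? = some c0 := by
        simpa [PySem.List.pyGet?_zero] using hget
      have hne : cs ≠ [] := hpre
      have hn : 0 < cs.length := List.length_pos_of_ne_nil hne
      rw [PySem.List.slice_from_one]
      set cur : List Char := cs.tail ++ [c0] with hcur
      have hcurlen : cur.length = cs.length := by
        simp [hcur, List.length_tail]; omega
      rw [pvChunks_eq cur]
      have hK : (pvChunk2 cur).length = (cs.length + 1) / 2 := by
        rw [pvChunk2_length, hcurlen]
      refine pvFoldAddCong _ _ _ _ ?_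
      rw [pvProduct_eq_bits, List.map_map, hK]
      refine List.map_congr_left fun m _ => ?_
      simp only [Function.comp]
      have hb : (pvBits ((cs.length + 1) / 2) m).length = (pvChunk2 cur).length := by
        simp [pvBits, hK]
      have hinner :
          ((pvChunk2 cur).zip (pvBits ((cs.length + 1) / 2) m)).foldl
              (fun acc q => acc ++ [if q.2 then q.1.map pvTrans else q.1]) []
            = ((pvChunk2 cur).zip (pvBits ((cs.length + 1) / 2) m)).map pvChoice := by
        simpa [pvChoice] using
          (PySem.List.foldl_append_singleton_eq_map (f := pvChoice)
            (l := (pvChunk2 cur).zip (pvBits ((cs.length + 1) / 2) m)) (acc := []))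
      rw [hinner]
      set rl := pvBits ((cs.length + 1) / 2) m with hrl
      set w : List Char := (((pvChunk2 cur).zip rl).map pvChoice).flatten with hw
      have hwlen : w.length = cs.length := by
        rw [hw, pvFlat_length cur rl hb, hcurlen]
      have hwne : w ≠ [] := by
        intro h0; rw [h0] at hwlen; simp at hwlen; omega
      have hwget : ∀ j : Nat, w[j]?
          = cur[j]?.map (fun c => if rl.getD (j / 2) false then pvTrans c else c) :=
        fun j => pvFlat_getElem? cur rl hb j
      rw [PySem.List.pyGetD_neg_one w ' ' hwne, PySem.List.slice_to_neg_one,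
        List.getLast_eq_getElem, List.dropLast_eq_take]
      refine congrArg String.ofList (List.ext_getElem? fun t => ?_)
      rw [List.getElem?_map, PySem.List.getElem?_enumerate]
      simp only [pvTr_eq, Option.map_map]
      cases t with
      | zero =>
          rw [hc0]
          have hlt : cs.length - 1 < w.length := by omega
          rw [List.getElem?_cons_zero, ← List.getElem?_eq_getElem
            (show w.length - 1 < w.length by omega)]
          have hcur0 : cur[cs.length - 1]? = some c0 := by
            have ht : cs.tail.length = cs.length - 1 := by simp
            rw [hcur, ← ht, List.getElem?_concat_length]
          rw [show w.length - 1 = cs.length - 1 by omega, hwget (cs.length - 1), hcur0]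
          have hidx : ((0 : Int) + (0 : Nat) + ↑cs.length - 1).toNat % cs.length
              = cs.length - 1 := by
            have h1 : ((0 : Int) + (0 : Nat) + ↑cs.length - 1).toNat = cs.length - 1 := by omega
            rw [h1, Nat.mod_eq_of_lt (by omega)]
          simp only [Function.comp, Option.map_some, hidx]
          have hp : (cs.length - 1) / 2 < (cs.length + 1) / 2 := by omega
          rw [hrl, pvBits_getD _ _ _ hp]
          rcases Nat.mod_two_eq_zero_or_one
            (m >>> ((cs.length + 1) / 2 - 1 - (cs.length - 1) / 2)) with h2 | h2 <;>
            simp [h2]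
      | succ j =>
          rw [List.getElem?_cons_succ, List.getElem?_take]
          split
          · next hj =>
              rw [hwlen] at hj
              rw [hwget j]
              have hcurj : cur[j]? = cs[j + 1]? := by
                rw [hcur, List.getElem?_append_left (by simp; omega), List.getElem?_tail]
              rw [hcurj, List.getElem?_eq_getElem (show j + 1 < cs.length by omega)]
              have hidx : ((0 : Int) + (↑(j + 1) : Int) + ↑cs.length - 1).toNat % cs.length
                  = j := by
                have h1 : ((0 : Int) + (↑(j + 1) : Int) + ↑cs.length - 1).toNat
                    = cs.length + j := by omega
                rw [h1, Nat.add_mod_left, Nat.mod_eq_of_lt (by omega)]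
              simp only [Function.comp, Option.map_some, hidx]
              have hp : j / 2 < (cs.length + 1) / 2 := by omega
              rw [hrl, pvBits_getD _ _ _ hp]
              rcases Nat.mod_two_eq_zero_or_one
                (m >>> ((cs.length + 1) / 2 - 1 - j / 2)) with h2 | h2 <;>
                simp [h2]
          · next hj =>
              rw [hwlen] at hj
              rw [List.getElem?_eq_none (by omega)]
              simp
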